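-- pv_equiv track=rewrite | github.com/NLarsen15/OTSOpy | OTSO/Parameters/functions/igrf_process.py | geopack_index
-- ===== SOURCE A (Python) =====
-- def geopack_index(degree: int, order: int) -> int:
--     """
--     Calculate GEOPACK array index for coefficients.
--     Based on sequential assignment: (1,0)→2, (1,1)→3, (2,0)→4, (2,1)→5, (2,2)→6, (3,0)→7, etc.
--     """
--     if degree == 0:
--         return 1  # g(0,0) or h(0,0) goes to index 1
--
--     # Count coefficients before this (degree, order)
--     count = 1  # Start at 1 to skip index 1
--
--     for n in range(1, degree + 1):
--         for m in range(0, n + 1):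
--             count += 1
--             if n == degree and m == order:
--                 return count
--
--     return count
-- ===== SOURCE B (Python) =====
-- def geopack_index(degree: int, order: int) -> int:
--     """
--     Calculate GEOPACK array index for coefficients, in closed form.
--     Sequential assignment: (1,0)->2, (1,1)->3, (2,0)->4, (2,1)->5, (2,2)->6, ...
--     """
--     if degree <= 0:
--         return 1  # g(0,0)/h(0,0) -> index 1 (and nothing is counted for degree < 0)
--     if 0 <= order <= degree:
--         # coefficients before degree n: 1 + sum_{k=1}^{n-1}(k+1) = 1 + (n-1)(n+2)//2
--         return 2 + (degree - 1) * (degree + 2) // 2 + order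
--     # (degree, order) never matched: total count of all coefficients up to this degree
--     return 1 + degree * (degree + 3) // 2
-- ===== Notes on version B (the rewrite author's own statement) =====
-- stated objective: faster
-- what changed: Replaced the nested counting loops over all (n,m) pairs by a closed-form triangular-number formula (with A's fall-through total kept as a closed form for out-of-range orders).
import Mathlib
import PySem

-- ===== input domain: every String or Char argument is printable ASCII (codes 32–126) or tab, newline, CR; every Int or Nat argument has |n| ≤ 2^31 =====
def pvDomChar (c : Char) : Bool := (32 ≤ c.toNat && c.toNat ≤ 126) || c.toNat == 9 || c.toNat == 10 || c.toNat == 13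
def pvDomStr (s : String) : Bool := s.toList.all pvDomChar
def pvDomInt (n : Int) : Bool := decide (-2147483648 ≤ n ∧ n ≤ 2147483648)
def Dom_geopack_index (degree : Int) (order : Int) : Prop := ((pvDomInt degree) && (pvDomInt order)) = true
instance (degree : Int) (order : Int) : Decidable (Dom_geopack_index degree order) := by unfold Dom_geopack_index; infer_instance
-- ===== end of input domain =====

-- B replaces A's O(degree^2) counting double loop by an O(1) closed-form triangular-number formula (objective: faster).

-- ===== PORT A =====
-- A's inner 'for m in range(0, n+1)' with early return: .inl count = still running, .inr v = returned v
def gpInnerStep (degree order n : Int) : Sum Int Int → Int → Sum Int Int :=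
  fun st m => match st with
    | .inl c => if n == degree && m == order then .inr (c + 1) else .inl (c + 1)
    | .inr v => .inr v

def gpInner (degree order n c : Int) : Sum Int Int :=
  (PySem.List.pyRange 0 (n + 1) 1).foldl (gpInnerStep degree order n) (.inl c)

-- A's outer 'for n in range(1, degree+1)'
def gpOuterStep (degree order : Int) : Sum Int Int → Int → Sum Int Int :=
  fun st n => match st with
    | .inl c => gpInner degree order n c
    | .inr v => .inr v

def geopack_index (degree : Int) (order : Int) : Int :=
  if degree == 0 then 1
  else
    match (PySem.List.pyRange 1 (degree + 1) 1).foldl (gpOuterStep degree order) (.inl 1) with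
    | .inl c => c      -- loop fell through: 'return count'
    | .inr v => v      -- early 'return count' inside the loop

-- ===== PORT B =====
def geopack_index_alt (degree : Int) (order : Int) : Int :=
  if degree ≤ 0 then 1
  else if 0 ≤ order ∧ order ≤ degree then
    2 + PySem.Int.floordiv ((degree - 1) * (degree + 2)) 2 + order
  else
    1 + PySem.Int.floordiv (degree * (degree + 3)) 2

-- ===== PRECONDITION & SPEC =====
def Spec_geopack_index (degree : Int) (order : Int) (out : Int) : Prop := out = geopack_index_alt degree order
instance (degree : Int) (order : Int) (out : Int) : Decidable (Spec_geopack_index degree order out) := by unfold Spec_geopack_index; infer_instance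

-- ===== CLAIM (what is proved, stated in full; the proofs are below) =====
def Claim_equal_geopack_index : Prop := ∀ (degree : Int) (order : Int), Dom_geopack_index degree order → Spec_geopack_index degree order (geopack_index degree order)

-- ===== LEMMAS AND PROOFS =====

theorem gpInner_foldl_inr (degree order n : Int) (L : List Int) (v : Int) :
    L.foldl (gpInnerStep degree order n) (.inr v) = .inr v := by
  induction L with
  | nil => rfl
  | cons x xs ih => simpa [gpInnerStep] using ih

theorem gpInner_no_hit (degree order n : Int) (L : List Int)
    (h : ∀ m ∈ L, ¬(n = degree ∧ m = order)) (c : Int) :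
    L.foldl (gpInnerStep degree order n) (.inl c) = .inl (c + L.length) := by
  induction L generalizing c with
  | nil => simp
  | cons x xs ih =>
    have hx : (n == degree && x == order) = false := by
      have := h x (by simp)
      simp only [Bool.and_eq_false_iff, beq_eq_false_iff_ne, ne_eq]
      tauto
    have := ih (fun m hm => h m (by simp [hm])) (c + 1)
    simp only [List.foldl_cons, gpInnerStep, hx, Bool.false_eq_true, if_false] at this ⊢
    rw [this]; congr 1; push_cast [List.length_cons]; omega

theorem gpInner_ne (degree order n c : Int) (hn : 0 ≤ n) (h : n ≠ degree) :
    gpInner degree order n c = .inl (c + n + 1) := by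
  unfold gpInner
  rw [gpInner_no_hit degree order n _ (fun m _ hc => h hc.1) c]
  rw [PySem.List.length_pyRange_one]
  congr 1; omega

theorem gpInner_hit (degree order c : Int) (ho : 0 ≤ order) (hd : order ≤ degree) :
    gpInner degree order degree c = .inr (c + order + 1) := by
  unfold gpInner
  rw [PySem.List.pyRange_one_append 0 order (degree + 1) ho (by omega), List.foldl_append]
  rw [gpInner_no_hit degree order degree _ (fun m hm hc => by
        rw [PySem.List.mem_pyRange_one] at hm; omega) c]
  rw [PySem.List.pyRange_one_cons (by omega : order < degree + 1)]
  have hlen : ((PySem.List.pyRange 0 order 1).length : Int) = order := by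
    rw [PySem.List.length_pyRange_one]; omega
  simp only [List.foldl_cons, gpInnerStep, BEq.rfl, Bool.and_self, if_true]
  rw [gpInner_foldl_inr]
  congr 1; omega

theorem gpInner_miss (degree order c : Int) (hd : 0 ≤ degree)
    (h : ¬(0 ≤ order ∧ order ≤ degree)) :
    gpInner degree order degree c = .inl (c + degree + 1) := by
  unfold gpInner
  rw [gpInner_no_hit degree order degree _ (fun m hm hc => by
        rw [PySem.List.mem_pyRange_one] at hm; exact h ⟨by omega, by omega⟩) c]
  rw [PySem.List.length_pyRange_one]
  congr 1; omega

theorem gpOuter_prefix (degree order : Int) (L : List Int)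
    (h : ∀ n ∈ L, 0 ≤ n ∧ n ≠ degree) (c : Int) :
    L.foldl (gpOuterStep degree order) (.inl c) = .inl (c + (L.map (fun n => n + 1)).sum) := by
  induction L generalizing c with
  | nil => simp
  | cons x xs ih =>
    have hx := h x (by simp)
    simp only [List.foldl_cons, gpOuterStep]
    rw [gpInner_ne degree order x c hx.1 hx.2, ih (fun n hn => h n (by simp [hn])) (c + x + 1)]
    simp only [List.map_cons, List.sum_cons]
    congr 1; ring

theorem gp_twoSum (k : Nat) :
    2 * (((List.range k).map (fun i : Nat => (1 + (i : Int)) + 1)).sum) = (k : Int) * (k + 3) := by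
  induction k with
  | zero => simp
  | succ m ih =>
    rw [List.range_succ, List.map_append, List.sum_append]
    simp only [List.map_cons, List.map_nil, List.sum_cons, List.sum_nil]
    push_cast
    push_cast at ih
    linarith

theorem gp_prefix_sum (degree : Int) (hd : 1 ≤ degree) :
    ((PySem.List.pyRange 1 degree 1).map (fun n => n + 1)).sum
      = PySem.Int.floordiv ((degree - 1) * (degree + 2)) 2 := by
  set k : Nat := (degree - 1).toNat with hk
  have hkd : (k : Int) = degree - 1 := by omega
  have hsum : 2 * (((PySem.List.pyRange 1 degree 1).map (fun n => n + 1)).sum)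
      = (degree - 1) * (degree + 2) := by
    rw [PySem.List.pyRange_one, List.map_map]
    simp only [Function.comp_def]
    rw [show (degree - 1).toNat = k from rfl]
    rw [gp_twoSum k, hkd]; ring
  rw [PySem.Int.floordiv_eq_ediv_of_pos (by norm_num), ← hsum]
  omega

-- ===== VERDICT (by name: the statement is the Claim_ definition above) =====
theorem geopack_index_spec : Claim_equal_geopack_index := by
  intro degree order _
  unfold Spec_geopack_index geopack_index geopack_index_alt
  by_cases h0 : degree = 0
  · simp [h0]
  by_cases hneg : degree ≤ 0
  · have : PySem.List.pyRange 1 (degree + 1) 1 = [] :=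
      PySem.List.pyRange_one_eq_nil (by omega)
    simp [h0, hneg, this]
  · -- degree ≥ 1
    have hd1 : 1 ≤ degree := by omega
    have hbeq : (degree == 0) = false := by simpa using h0
    simp only [hbeq, Bool.false_eq_true, if_false, if_neg hneg]
    rw [PySem.List.pyRange_one_append 1 degree (degree + 1) hd1 (by omega), List.foldl_append]
    rw [gpOuter_prefix degree order _ (fun n hn => by
          rw [PySem.List.mem_pyRange_one] at hn; exact ⟨by omega, by omega⟩) 1]
    rw [PySem.List.pyRange_one_singleton]
    simp only [List.foldl_cons, List.foldl_nil, gpOuterStep]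
    rw [gp_prefix_sum degree hd1]
    by_cases hord : 0 ≤ order ∧ order ≤ degree
    · rw [gpInner_hit degree order _ hord.1 hord.2]
      simp only [if_pos hord]; ring
    · rw [gpInner_miss degree order _ (by omega) hord]
      simp only [if_neg hord]
      have h2 : degree * (degree + 3) = (degree - 1) * (degree + 2) + 2 * (degree + 1) := by ring
      rw [PySem.Int.floordiv_eq_ediv_of_pos (by norm_num),
          PySem.Int.floordiv_eq_ediv_of_pos (by norm_num), h2]
      omega
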